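-- pv_equiv track=rewrite | github.com/rowancallahan/speaky | transpiler.py | _enchant_string
-- ===== SOURCE A (Python) =====
-- def _enchant_string(body):
--     """Build f-string from spoken template.
--
--     Supports dotted variable refs:
--         variable self dot data  → {self.data}
--         variable x into name    → {x.name}
--     """
--     parts = []
--     words = body.split()
--     i = 0
--     while i < len(words):
--         if words[i] in ("variable", "var") and i + 1 < len(words):
--             # Collect the variable name, including dot chains
--             var_parts = [words[i + 1]]
--             i += 2
--             while i + 1 < len(words) and words[i] in ("dot", "into"):
--                 var_parts.append(words[i + 1])
--                 i += 2
--             parts.append("{" + ".".join(var_parts) + "}")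
--         else:
--             parts.append(words[i])
--             i += 1
--     return 'f"' + " ".join(parts) + '"'
-- ===== SOURCE B (Python) =====
-- def _enchant_string(body):
--     # Single-pass state machine over the words (modes: NORMAL / EXPECT_NAME /
--     # HAVE_CHAIN / EXPECT_CHAIN) instead of A's nested index loops.
--     NORMAL, EXPECT_NAME, HAVE_CHAIN, EXPECT_CHAIN = 0, 1, 2, 3
--     words = body.split()
--     n = len(words)
--     parts = []
--     buf = []
--     mode = NORMAL
--     i = 0
--     while i <= n:
--         if i == n:
--             if mode == HAVE_CHAIN:
--                 parts.append("{" + ".".join(buf) + "}")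
--             break
--         w = words[i]
--         if mode == NORMAL:
--             if w in ("variable", "var") and i + 1 < n:
--                 mode = EXPECT_NAME
--                 i += 1
--             else:
--                 parts.append(w)
--                 i += 1
--         elif mode == EXPECT_NAME:
--             buf = [w]
--             mode = HAVE_CHAIN
--             i += 1
--         elif mode == HAVE_CHAIN:
--             if w in ("dot", "into") and i + 1 < n:
--                 mode = EXPECT_CHAIN
--                 i += 1
--             else:
--                 parts.append("{" + ".".join(buf) + "}")
--                 buf = []
--                 mode = NORMAL  # reprocess current word
--         else:  # EXPECT_CHAIN
--             buf.append(w)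
--             mode = HAVE_CHAIN
--             i += 1
--     return 'f"' + " ".join(parts) + '"'
-- ===== Notes on version B (the rewrite author's own statement) =====
-- stated objective: alternative
-- what changed: Replaced A's nested while-loops with index jumps (+2 inner collection loop) by a single linear state machine with four explicit modes (NORMAL/EXPECT_NAME/HAVE_CHAIN/EXPECT_CHAIN) and a chain buffer that is flushed on chain end or end of input.
import Mathlib
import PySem

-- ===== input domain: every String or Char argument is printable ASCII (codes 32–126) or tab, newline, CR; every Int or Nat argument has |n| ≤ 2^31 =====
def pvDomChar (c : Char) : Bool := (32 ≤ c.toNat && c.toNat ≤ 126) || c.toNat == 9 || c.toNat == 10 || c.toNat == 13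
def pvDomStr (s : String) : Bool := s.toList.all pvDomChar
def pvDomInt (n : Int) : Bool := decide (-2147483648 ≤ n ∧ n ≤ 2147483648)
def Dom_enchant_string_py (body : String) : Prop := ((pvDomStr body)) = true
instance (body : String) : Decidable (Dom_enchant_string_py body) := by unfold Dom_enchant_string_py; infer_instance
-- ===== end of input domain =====

-- B replaces A's nested index loops by a single-pass four-mode state machine; objective: alternative (same cost).

-- ===== PORT A =====
-- inner while loop of A: collect the dot-chain, returning (var_parts, final i)
def pvCollect (words : List String) (i : Nat) (varParts : List String) :
    List String × Nat :=
  if i + 1 < words.length ∧ (words.getD i "" = "dot" ∨ words.getD i "" = "into") then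
    pvCollect words (i + 2) (varParts ++ [words.getD (i + 1) ""])
  else
    (varParts, i)
termination_by words.length - i

theorem pvCollect_ge (words : List String) (i : Nat) (vp : List String) :
    i ≤ (pvCollect words i vp).2 := by
  unfold pvCollect
  split
  · rename_i h
    have := pvCollect_ge words (i + 2) (vp ++ [words.getD (i + 1) ""])
    omega
  · simp
termination_by words.length - i

-- outer while loop of A
def pvOuter (words : List String) (i : Nat) (parts : List String) : List String :=
  if h : i < words.length then
    if (words.getD i "" = "variable" ∨ words.getD i "" = "var") ∧ i + 1 < words.length then
      let r := pvCollect words (i + 2) [words.getD (i + 1) ""]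
      pvOuter words r.2 (parts ++ ["{" ++ PySem.Str.join "." r.1 ++ "}"])
    else
      pvOuter words (i + 1) (parts ++ [words.getD i ""])
  else
    parts
termination_by words.length - i
decreasing_by
  all_goals try omega
  all_goals (have hge := pvCollect_ge words (i + 2) [words.getD (i + 1) ""]; omega)

def enchant_string_py (body : String) : String :=
  let words := PySem.Str.split₀ body
  "f\"" ++ PySem.Str.join " " (pvOuter words 0 []) ++ "\""

-- ===== PORT B =====
-- modes: 0 = NORMAL, 1 = EXPECT_NAME, 2 = HAVE_CHAIN, 3 = EXPECT_CHAIN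
def pvAlt (words : List String) (i : Nat) (mode : Nat)
    (buf parts : List String) : List String :=
  if i ≤ words.length then
    if i = words.length then
      if mode = 2 then parts ++ ["{" ++ PySem.Str.join "." buf ++ "}"] else parts
    else
      let w := words.getD i ""
      if mode = 0 then
        if (w = "variable" ∨ w = "var") ∧ i + 1 < words.length then
          pvAlt words (i + 1) 1 buf parts
        else
          pvAlt words (i + 1) 0 buf (parts ++ [w])
      else if mode = 1 then
        pvAlt words (i + 1) 2 [w] parts
      else if mode = 2 then
        if (w = "dot" ∨ w = "into") ∧ i + 1 < words.length then
          pvAlt words (i + 1) 3 buf parts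
        else
          pvAlt words i 0 [] (parts ++ ["{" ++ PySem.Str.join "." buf ++ "}"])
      else
        pvAlt words (i + 1) 2 (buf ++ [w]) parts
  else
    parts
termination_by 2 * (words.length - i) + (if mode = 2 then 1 else 0)
decreasing_by all_goals first | (simp_all; omega) | simp_all

def enchant_string_py_alt (body : String) : String :=
  let words := PySem.Str.split₀ body
  "f\"" ++ PySem.Str.join " " (pvAlt words 0 0 [] []) ++ "\""

-- ===== PRECONDITION & SPEC =====
def Spec_enchant_string_py (body : String) (out : String) : Prop := out = enchant_string_py_alt body
instance (body : String) (out : String) : Decidable (Spec_enchant_string_py body out) := by unfold Spec_enchant_string_py; infer_instance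

-- ===== CLAIM (what is proved, stated in full; the proofs are below) =====
def Claim_equal_enchant_string_py : Prop := ∀ (body : String), Dom_enchant_string_py body → Spec_enchant_string_py body (enchant_string_py body)

-- ===== LEMMAS AND PROOFS =====

theorem pvCollect_le (words : List String) (i : Nat) (vp : List String)
    (h : i ≤ words.length) : (pvCollect words i vp).2 ≤ words.length := by
  unfold pvCollect
  split
  · rename_i hc
    exact pvCollect_le words (i + 2) (vp ++ [words.getD (i + 1) ""]) (by omega)
  · simpa using h
termination_by words.length - i


-- B's HAVE_CHAIN/EXPECT_CHAIN cycle simulates A's inner collecting loop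
theorem pvAlt_chain (words : List String) (i : Nat) (buf parts : List String)
    (h : i ≤ words.length) :
    pvAlt words i 2 buf parts =
      pvAlt words (pvCollect words i buf).2 0 []
        (parts ++ ["{" ++ PySem.Str.join "." (pvCollect words i buf).1 ++ "}"]) := by
  rw [pvCollect]
  split
  · rename_i hc
    rw [pvAlt]
    rw [if_pos h, if_neg (by omega : ¬ i = words.length)]
    show (if (2:Nat) = 0 then _ else _) = _
    rw [if_neg (by decide : ¬ (2:Nat) = 0), if_neg (by decide : ¬ (2:Nat) = 1),
        if_pos rfl, if_pos ⟨hc.2, hc.1⟩]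
    rw [pvAlt]
    rw [if_pos (by omega : i + 1 ≤ words.length),
        if_neg (by omega : ¬ i + 1 = words.length)]
    show (if (3:Nat) = 0 then _ else _) = _
    rw [if_neg (by decide : ¬ (3:Nat) = 0), if_neg (by decide : ¬ (3:Nat) = 1),
        if_neg (by decide : ¬ (3:Nat) = 2)]
    exact pvAlt_chain words (i + 2) (buf ++ [words.getD (i + 1) ""]) parts (by omega)
  · rename_i hc
    rw [pvAlt]
    by_cases he : i = words.length
    · subst he
      rw [if_pos le_rfl, if_pos rfl, if_pos rfl]
      rw [pvAlt]
      rw [if_pos le_rfl, if_pos rfl]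
      rw [if_neg (by decide : ¬ (0:Nat) = 2)]
    · have hi : i < words.length := by omega
      rw [if_pos h, if_neg he]
      show (if (2:Nat) = 0 then _ else _) = _
      rw [if_neg (by decide : ¬ (2:Nat) = 0), if_neg (by decide : ¬ (2:Nat) = 1),
          if_pos rfl, if_neg (fun hx => hc ⟨hx.2, hx.1⟩)]
termination_by words.length - i

theorem pvOuter_eq_pvAlt (words : List String) (i : Nat) (parts : List String)
    (h : i ≤ words.length) :
    pvOuter words i parts = pvAlt words i 0 [] parts := by
  rw [pvOuter]
  split
  · rename_i hi
    split
    · rename_i hv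
      show pvOuter words (pvCollect words (i + 2) [words.getD (i + 1) ""]).2
            (parts ++ ["{" ++ PySem.Str.join "."
              (pvCollect words (i + 2) [words.getD (i + 1) ""]).1 ++ "}"]) = _
      rw [pvAlt]
      rw [if_pos h, if_neg (by omega : ¬ i = words.length)]
      rw [if_pos rfl, if_pos hv]
      rw [pvAlt]
      rw [if_pos (by omega : i + 1 ≤ words.length),
          if_neg (by omega : ¬ i + 1 = words.length)]
      show _ = (if (1:Nat) = 0 then _ else _)
      rw [if_neg (by decide : ¬ (1:Nat) = 0), if_pos rfl]
      rw [pvAlt_chain words (i + 2) [words.getD (i + 1) ""] parts (by omega)]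
      exact pvOuter_eq_pvAlt words _ _
        (pvCollect_le words (i + 2) [words.getD (i + 1) ""] (by omega))
    · rename_i hv
      rw [pvAlt]
      rw [if_pos h, if_neg (by omega : ¬ i = words.length)]
      rw [if_pos rfl, if_neg hv]
      exact pvOuter_eq_pvAlt words (i + 1) (parts ++ [words.getD i ""]) (by omega)
  · rename_i hi
    have he : i = words.length := by omega
    subst he
    rw [pvAlt]
    rw [if_pos le_rfl, if_pos rfl]
    rw [if_neg (by decide : ¬ (0:Nat) = 2)]
termination_by words.length - i
decreasing_by
  all_goals try omega
  all_goals (have hge := pvCollect_ge words (i + 2) [words.getD (i + 1) ""]; omega)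

-- ===== VERDICT (by name: the statement is the Claim_ definition above) =====
theorem enchant_string_py_spec : Claim_equal_enchant_string_py := by
  intro body _
  unfold Spec_enchant_string_py enchant_string_py enchant_string_py_alt
  simp only []
  rw [pvOuter_eq_pvAlt _ 0 [] (by omega)]
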